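-- pv_equiv track=rewrite | github.com/jadechjin/zotero-mineru-dify | services/pipeline_runner.py | _aggregate_parent_upload_outcomes
-- ===== SOURCE A (Python) =====
-- from collections import defaultdict
--
-- def _resolve_parent_task_key(md_results: dict, item_key: str) -> str:
--     data = md_results.get(item_key) if isinstance(md_results, dict) else None
--     parent = ""
--     if isinstance(data, dict):
--         parent = str(data.get("parent_task_key") or "")
--     base = parent or str(item_key or "")
--     return base.split("#", 1)[0]
--
-- def _aggregate_parent_upload_outcomes(
--     uploaded_keys: list[str],
--     failed_keys: list[str],
--     md_results: dict,
--     parent_part_totals: dict[str, int],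
-- ) -> tuple[set[str], set[str]]:
--     uploaded_parts = defaultdict(set)
--     failed_parents = set()
--
--     for key in uploaded_keys or []:
--         parent = _resolve_parent_task_key(md_results, key)
--         if parent:
--             uploaded_parts[parent].add(key)
--
--     for key in failed_keys or []:
--         parent = _resolve_parent_task_key(md_results, key)
--         if parent:
--             failed_parents.add(parent)
--
--     candidate_parents = set(parent_part_totals.keys())
--     candidate_parents.update(uploaded_parts.keys())
--     candidate_parents.update(failed_parents)
--
--     succeeded = set()
--     for parent in candidate_parents:
--         if parent in failed_parents:
--             continue
--         expected_parts = int(parent_part_totals.get(parent, 1))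
--         if len(uploaded_parts.get(parent, set())) >= expected_parts:
--             succeeded.add(parent)
--         else:
--             failed_parents.add(parent)
--
--     return succeeded, failed_parents
-- ===== SOURCE B (Python) =====
-- def _resolve_parent_task_key(md_results: dict, item_key: str) -> str:
--     data = md_results.get(item_key) if isinstance(md_results, dict) else None
--     parent = ""
--     if isinstance(data, dict):
--         parent = str(data.get("parent_task_key") or "")
--     base = parent or str(item_key or "")
--     return base.split("#", 1)[0]
--
-- def _aggregate_parent_upload_outcomes(
--     uploaded_keys: list[str],
--     failed_keys: list[str],
--     md_results: dict,
--     parent_part_totals: dict[str, int],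
-- ) -> tuple[set[str], set[str]]:
--     up_parents = [_resolve_parent_task_key(md_results, k) for k in (uploaded_keys or [])]
--     directly_failed = {p for p in
--                        (_resolve_parent_task_key(md_results, k) for k in (failed_keys or []))
--                        if p}
--     candidates = set(parent_part_totals) | {p for p in up_parents if p} | directly_failed
--
--     def distinct_uploads(parent):
--         return len({k for k, q in zip(uploaded_keys or [], up_parents) if q and q == parent})
--
--     succeeded = {p for p in candidates
--                  if p not in directly_failed
--                  and distinct_uploads(p) >= int(parent_part_totals.get(p, 1))}
--     return succeeded, directly_failed | (candidates - succeeded)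
-- ===== Notes on version B (the rewrite author's own statement) =====
-- stated objective: alternative
-- what changed: B replaces A's accumulating parent->set dict and the final loop that mutates the failed set with a map/filter pipeline: it resolves all parents up front, counts each candidate's distinct uploaded keys by a direct scan, builds the succeeded set as a comprehension over the candidates, and derives the failed set as the complement (directly_failed | candidates - succeeded) instead of growing it inside the loop.
import Mathlib
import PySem

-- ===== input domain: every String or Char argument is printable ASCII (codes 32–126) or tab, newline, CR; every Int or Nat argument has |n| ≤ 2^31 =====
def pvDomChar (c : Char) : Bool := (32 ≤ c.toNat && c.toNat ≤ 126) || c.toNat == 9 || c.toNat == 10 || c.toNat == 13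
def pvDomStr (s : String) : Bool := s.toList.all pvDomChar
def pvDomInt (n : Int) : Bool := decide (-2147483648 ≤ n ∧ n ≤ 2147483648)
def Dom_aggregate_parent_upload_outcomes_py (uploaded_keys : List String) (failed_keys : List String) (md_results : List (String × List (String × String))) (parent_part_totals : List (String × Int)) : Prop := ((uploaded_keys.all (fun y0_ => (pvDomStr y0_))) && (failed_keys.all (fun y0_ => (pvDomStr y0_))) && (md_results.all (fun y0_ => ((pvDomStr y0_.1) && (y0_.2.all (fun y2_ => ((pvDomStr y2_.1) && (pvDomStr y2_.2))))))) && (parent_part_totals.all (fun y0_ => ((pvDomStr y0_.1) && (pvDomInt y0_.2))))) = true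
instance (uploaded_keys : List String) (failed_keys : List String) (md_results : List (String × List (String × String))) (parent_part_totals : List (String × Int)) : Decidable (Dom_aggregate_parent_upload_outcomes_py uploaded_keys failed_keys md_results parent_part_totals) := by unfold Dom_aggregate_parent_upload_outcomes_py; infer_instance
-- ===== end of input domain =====

-- B derives the failed set by complement (candidates minus succeeded) and counts each
-- parent's distinct uploads by a direct scan, instead of A's accumulating dict and
-- failed-set mutation inside the final loop; objective: alternative decomposition.


-- ===== PORT A =====
-- shared module helper _resolve_parent_task_key (used verbatim by both Pythons)
def resolveParent (md_results : List (String × List (String × String))) (item_key : String) : String :=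
  -- data = md_results.get(item_key); parent = str(data.get("parent_task_key") or "")
  let parent : String :=
    match (PySem.Dict.mk md_results).get? item_key with
    | some data => ((PySem.Dict.mk data).get? "parent_task_key").getD ""
    | none => ""
  -- base = parent or str(item_key or "")  (all values are str here)
  let base := if parent = "" then item_key else parent
  -- base.split("#", 1)[0]; the split list is never empty, headD is exact
  ((PySem.Str.splitMax? base "#" 1).getD []).headD ""

def aggregate_parent_upload_outcomes_py (uploaded_keys : List String) (failed_keys : List String) (md_results : List (String × List (String × String))) (parent_part_totals : List (String × Int)) : List String × List String :=
  -- uploaded_parts = defaultdict(set); for key in uploaded_keys: …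
  let uploaded_parts : PySem.Dict String (PySem.Set String) :=
    uploaded_keys.foldl (fun d key =>
      let parent := resolveParent md_results key
      if parent ≠ "" then d.modify parent PySem.Set.empty (fun s => s.add key) else d)
      PySem.Dict.empty
  -- failed_parents = set(); for key in failed_keys: …
  let failed_parents : PySem.Set String :=
    failed_keys.foldl (fun s key =>
      let parent := resolveParent md_results key
      if parent ≠ "" then s.add parent else s)
      PySem.Set.empty
  -- candidate_parents = set(parent_part_totals.keys()); update(uploaded_parts.keys()); update(failed_parents)
  let candidate_parents : PySem.Set String :=
    ((PySem.Set.ofList (PySem.Dict.mk parent_part_totals).keys).update uploaded_parts.keys).update failed_parents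
  -- succeeded = set(); for parent in candidate_parents: … (failed_parents mutates in the loop)
  let res : PySem.Set String × PySem.Set String :=
    candidate_parents.foldl (fun acc parent =>
      if acc.2.contains parent then acc
      else
        let expected := (PySem.Dict.mk parent_part_totals).getD parent 1
        if PySem.Set.len (uploaded_parts.getD parent PySem.Set.empty) ≥ expected then
          (acc.1.add parent, acc.2)
        else (acc.1, acc.2.add parent))
      (PySem.Set.empty, failed_parents)
  res

-- ===== PORT B =====
def aggregate_parent_upload_outcomes_py_alt (uploaded_keys : List String) (failed_keys : List String) (md_results : List (String × List (String × String))) (parent_part_totals : List (String × Int)) : List String × List String :=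
  -- up_parents = [resolve(k) for k in uploaded_keys]
  let up_parents := uploaded_keys.map (fun k => resolveParent md_results k)
  -- directly_failed = {p for p in (resolve(k) for k in failed_keys) if p}
  let directly_failed : PySem.Set String :=
    PySem.Set.ofList ((failed_keys.map (fun k => resolveParent md_results k)).filter (fun p => p ≠ ""))
  -- candidates = set(parent_part_totals) | {p for p in up_parents if p} | directly_failed
  let candidates : PySem.Set String :=
    ((PySem.Set.ofList (parent_part_totals.map (fun kv => kv.1))).union
      (PySem.Set.ofList (up_parents.filter (fun p => p ≠ "")))).union directly_failed
  -- distinct_uploads(p) = len({k for k, q in zip(uploaded_keys, up_parents) if q and q == p})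
  let distinct_uploads : String → Int := fun parent =>
    PySem.Set.len (PySem.Set.ofList
      (((uploaded_keys.zip up_parents).filter (fun kq => kq.2 ≠ "" ∧ kq.2 = parent)).map (fun kq => kq.1)))
  -- succeeded = {p for p in candidates if p not in directly_failed and distinct_uploads(p) >= int(totals.get(p, 1))}
  let succeeded : PySem.Set String :=
    PySem.Set.ofList (candidates.filter (fun p =>
      !(directly_failed.contains p) &&
        decide (distinct_uploads p ≥ (PySem.Dict.mk parent_part_totals).getD p 1)))
  -- return succeeded, directly_failed | (candidates - succeeded)
  (succeeded, directly_failed.union (candidates.diff succeeded))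

-- ===== PRECONDITION & SPEC =====
def Spec_aggregate_parent_upload_outcomes_py (uploaded_keys : List String) (failed_keys : List String) (md_results : List (String × List (String × String))) (parent_part_totals : List (String × Int)) (out : List String × List String) : Prop := out = aggregate_parent_upload_outcomes_py_alt uploaded_keys failed_keys md_results parent_part_totals
instance (uploaded_keys : List String) (failed_keys : List String) (md_results : List (String × List (String × String))) (parent_part_totals : List (String × Int)) (out : List String × List String) : Decidable (Spec_aggregate_parent_upload_outcomes_py uploaded_keys failed_keys md_results parent_part_totals out) := by unfold Spec_aggregate_parent_upload_outcomes_py; infer_instance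

-- ===== CLAIM (what is proved, stated in full; the proofs are below) =====
def Claim_equal_aggregate_parent_upload_outcomes_py : Prop := ∀ (uploaded_keys : List String) (failed_keys : List String) (md_results : List (String × List (String × String))) (parent_part_totals : List (String × Int)), Dom_aggregate_parent_upload_outcomes_py uploaded_keys failed_keys md_results parent_part_totals → Spec_aggregate_parent_upload_outcomes_py uploaded_keys failed_keys md_results parent_part_totals (aggregate_parent_upload_outcomes_py uploaded_keys failed_keys md_results parent_part_totals)

-- ===== LEMMAS AND PROOFS =====

-- A's failed-parents accumulation is the ordered dedup of the nonempty resolved parents.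
theorem failed_fold_eq (md_results : List (String × List (String × String))) (l : List String) (s : PySem.Set String) :
    l.foldl (fun s key =>
      if resolveParent md_results key ≠ "" then s.add (resolveParent md_results key) else s) s
    = s.update ((l.map (fun k => resolveParent md_results k)).filter (fun p => p ≠ "")) := by
  induction l generalizing s with
  | nil => simp [PySem.Set.update]
  | cons k l ih =>
    rw [List.foldl_cons, ih, List.map_cons, List.filter_cons]
    by_cases h : resolveParent md_results k = ""
    · simp [h]
    · simp [h, PySem.Set.update_cons]

theorem keys_modify_add {ν : Type} (d : PySem.Dict String ν) (k : String) (d0 : ν) (f : ν → ν) :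
    (d.modify k d0 f).keys = PySem.Set.add d.keys k := by
  rw [PySem.Dict.keys_modify]
  by_cases h : d.contains k
  · rw [PySem.Dict.keys_insert_of_contains _ _ h, PySem.Set.add_of_mem ((PySem.Dict.contains_iff_mem_keys d k).1 h)]
  · rw [PySem.Dict.keys_insert_of_not_contains _ _ (by simpa using h),
        PySem.Set.add_of_not_mem (fun hm => h ((PySem.Dict.contains_iff_mem_keys d k).2 hm))]

-- A's uploaded_parts dict has exactly the nonempty resolved parents as keys, in first-occurrence order.
theorem uploaded_keys_eq (md_results : List (String × List (String × String))) (l : List String) (d : PySem.Dict String (PySem.Set String)) :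
    (l.foldl (fun d key =>
      if resolveParent md_results key ≠ "" then d.modify (resolveParent md_results key) PySem.Set.empty (fun s => s.add key) else d) d).keys
    = PySem.Set.update d.keys ((l.map (fun k => resolveParent md_results k)).filter (fun p => p ≠ "")) := by
  induction l generalizing d with
  | nil => simp [PySem.Set.update]
  | cons k l ih =>
    rw [List.foldl_cons, ih, List.map_cons, List.filter_cons]
    by_cases h : resolveParent md_results k = ""
    · rw [if_neg (by simp [h]), if_neg (by simp [h])]
    · rw [if_pos h, if_pos (by simp [h]), keys_modify_add, PySem.Set.update_cons]

-- A's per-parent uploaded key set equals a filter of the uploaded keys, for a nonempty parent.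
theorem uploaded_getD_eq (md_results : List (String × List (String × String))) (l : List String) (d : PySem.Dict String (PySem.Set String)) (p : String) (hp : p ≠ "") :
    (l.foldl (fun d key =>
      if resolveParent md_results key ≠ "" then d.modify (resolveParent md_results key) PySem.Set.empty (fun s => s.add key) else d) d).getD p PySem.Set.empty
    = PySem.Set.update (d.getD p PySem.Set.empty) (l.filter (fun k => resolveParent md_results k = p)) := by
  induction l generalizing d with
  | nil => simp [PySem.Set.update]
  | cons k l ih =>
    rw [List.foldl_cons, ih, List.filter_cons]
    by_cases h : resolveParent md_results k = ""
    · have hne : resolveParent md_results k ≠ p := by rw [h]; exact Ne.symm hp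
      rw [if_neg (by simp [h]), if_neg (by simp [hne])]
    · by_cases hkp : resolveParent md_results k = p
      · rw [if_pos h, if_pos (by simp [hkp]), PySem.Set.update_cons, hkp, PySem.Dict.getD_modify_self]
      · rw [if_pos h, if_neg (by simp [hkp]), PySem.Dict.getD_modify]
        rw [if_neg (fun e => hkp e.symm)]

-- B's zip-scan collects exactly the uploaded keys whose resolved parent is p (p nonempty).
theorem zip_filter_eq (md_results : List (String × List (String × String))) (l : List String) (p : String) (hp : p ≠ "") :
    ((l.zip (l.map (fun k => resolveParent md_results k))).filter (fun kq => kq.2 ≠ "" ∧ kq.2 = p)).map (fun kq => kq.1)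
    = l.filter (fun k => resolveParent md_results k = p) := by
  induction l with
  | nil => simp
  | cons k l ih =>
    rw [List.map_cons, List.zip_cons_cons, List.filter_cons, List.filter_cons]
    by_cases hkp : resolveParent md_results k = p
    · rw [if_pos (by simp [hkp, hp]), if_pos (by simp [hkp]), List.map_cons, ih]
    · rw [if_neg (by simp [hkp]), if_neg (by simp [hkp]), ih]

-- A's final loop, unrolled: membership in the mutating failed set coincides with membership
-- in the initial failed set, because the candidates are distinct.
theorem main_loop_eq (P : String → Prop) [DecidablePred P] (df : PySem.Set String) :
    ∀ (C : List String) (s u : List String), C.Nodup → (∀ p ∈ C, p ∉ s) → (∀ p ∈ C, p ∉ u) →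
    C.foldl (fun (acc : PySem.Set String × PySem.Set String) parent =>
      if acc.2.contains parent then acc
      else if P parent then (acc.1.add parent, acc.2)
      else (acc.1, acc.2.add parent)) (s, df ++ u)
    = (s ++ C.filter (fun p => !(df.contains p) && decide (P p)),
       (df ++ u) ++ C.filter (fun p => !(df.contains p) && !(decide (P p)))) := by
  intro C
  induction C with
  | nil => intro s u _ _ _; simp
  | cons p C ih =>
    intro s u hnd hs hu
    have hpu : p ∉ u := hu p (by simp)
    have hps : p ∉ s := hs p (by simp)
    have hs' : ∀ q ∈ C, q ∉ s := fun q hq => hs q (by simp [hq])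
    have hu' : ∀ q ∈ C, q ∉ u := fun q hq => hu q (by simp [hq])
    have hnp : ∀ q ∈ C, q ≠ p := fun q hq e => (List.nodup_cons.1 hnd).1 (e ▸ hq)
    rw [List.foldl_cons, List.filter_cons, List.filter_cons]
    by_cases hmem : p ∈ df
    · have hc : PySem.Set.contains (df ++ u) p = true := by
        simp [PySem.Set.contains_eq_listContains, hmem]
      rw [if_pos hc,
        if_neg (by simp [PySem.Set.contains_eq_listContains, hmem]),
        if_neg (by simp [PySem.Set.contains_eq_listContains, hmem]),
        ih s u hnd.of_cons hs' hu']
    · have hc : ¬ (PySem.Set.contains (df ++ u) p = true) := by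
        simp [PySem.Set.contains_eq_listContains, hmem, hpu]
      rw [if_neg hc]
      by_cases hok : P p
      · rw [if_pos hok,
          if_pos (by simp [PySem.Set.contains_eq_listContains, hmem, hok]),
          if_neg (by simp [PySem.Set.contains_eq_listContains, hmem, hok])]
        have hadd : PySem.Set.add s p = s ++ [p] := PySem.Set.add_of_not_mem hps
        rw [hadd, ih (s ++ [p]) u hnd.of_cons
          (fun q hq => by simp [hs' q hq, hnp q hq])
          hu']
        simp
      · rw [if_neg hok,
          if_neg (by simp [PySem.Set.contains_eq_listContains, hmem, hok]),
          if_pos (by simp [PySem.Set.contains_eq_listContains, hmem, hok])]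
        have hadd : PySem.Set.add (df ++ u) p = df ++ (u ++ [p]) := by
          rw [PySem.Set.add_of_not_mem (by simp [hmem, hpu]), List.append_assoc]
        rw [hadd, ih s (u ++ [p]) hnd.of_cons hs'
          (fun q hq => by simp [hu' q hq, hnp q hq])]
        simp

theorem contains_filter_of_mem (l : List String) (a : String) (b : String → Bool) (ha : a ∈ l) :
    (l.filter b).contains a = b a := by
  cases hb : b a
  · simp [List.mem_filter, hb]
  · simp [List.mem_filter, ha, hb]

theorem ports_eq (uploaded_keys : List String) (failed_keys : List String) (md_results : List (String × List (String × String))) (parent_part_totals : List (String × Int)) :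
    aggregate_parent_upload_outcomes_py uploaded_keys failed_keys md_results parent_part_totals
    = aggregate_parent_upload_outcomes_py_alt uploaded_keys failed_keys md_results parent_part_totals := by
  unfold aggregate_parent_upload_outcomes_py aggregate_parent_upload_outcomes_py_alt
  dsimp only
  rw [failed_fold_eq md_results failed_keys PySem.Set.empty, PySem.Set.update_empty,
      uploaded_keys_eq md_results uploaded_keys PySem.Dict.empty,
      PySem.Dict.keys_empty, PySem.Set.update_nil_left]
  simp only [PySem.Set.union, PySem.Set.diff]
  simp only [PySem.Dict.keys]
  -- A's per-parent uploaded set = B's zip-scan set, for every parent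
  have hsets : ∀ p : String,
      ((uploaded_keys.foldl (fun d key =>
          if resolveParent md_results key ≠ "" then d.modify (resolveParent md_results key) PySem.Set.empty (fun s => s.add key) else d)
          PySem.Dict.empty).getD p PySem.Set.empty)
      = PySem.Set.ofList (((uploaded_keys.zip (uploaded_keys.map (fun k => resolveParent md_results k))).filter
          (fun kq => kq.2 ≠ "" ∧ kq.2 = p)).map (fun kq => kq.1)) := by
    intro p
    by_cases hp : p = ""
    · subst hp
      have hkeys : (uploaded_keys.foldl (fun d key =>
          if resolveParent md_results key ≠ "" then d.modify (resolveParent md_results key) PySem.Set.empty (fun s => s.add key) else d)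
          PySem.Dict.empty).keys
          = PySem.Set.ofList ((uploaded_keys.map (fun k => resolveParent md_results k)).filter (fun p => p ≠ "")) := by
        rw [uploaded_keys_eq md_results uploaded_keys PySem.Dict.empty, PySem.Dict.keys_empty, PySem.Set.update_nil_left]
      have hnc : (uploaded_keys.foldl (fun d key =>
          if resolveParent md_results key ≠ "" then d.modify (resolveParent md_results key) PySem.Set.empty (fun s => s.add key) else d)
          PySem.Dict.empty).contains "" = false := by
        by_cases hcon : (uploaded_keys.foldl (fun d key =>
          if resolveParent md_results key ≠ "" then d.modify (resolveParent md_results key) PySem.Set.empty (fun s => s.add key) else d)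
          PySem.Dict.empty).contains "" = true
        · exfalso
          have := (PySem.Dict.contains_iff_mem_keys _ _).1 hcon
          rw [hkeys] at this
          have := (PySem.Set.mem_ofList _ _).1 this
          simp at this
        · simpa using hcon
      rw [PySem.Dict.getD_of_not_contains _ _ hnc]
      have hz : ((uploaded_keys.zip (uploaded_keys.map (fun k => resolveParent md_results k))).filter
          (fun kq => kq.2 ≠ "" ∧ kq.2 = "")) = [] := by
        rw [List.filter_eq_nil_iff]; intro kq _; simp
      rw [hz]
      rfl
    · rw [uploaded_getD_eq md_results uploaded_keys PySem.Dict.empty p hp, PySem.Dict.getD_empty,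
        PySem.Set.update_empty, zip_filter_eq md_results uploaded_keys p hp]
  simp only [hsets]
  set df := PySem.Set.ofList ((failed_keys.map (fun k => resolveParent md_results k)).filter (fun p => p ≠ "")) with hdfdef
  set C := ((PySem.Set.ofList (parent_part_totals.map (fun x => x.1))).update
      (PySem.Set.ofList ((uploaded_keys.map (fun k => resolveParent md_results k)).filter (fun p => p ≠ "")))).update df with hCdef
  have hCnd : C.Nodup := PySem.Set.nodup_update _ _ (PySem.Set.nodup_update _ _ (PySem.Set.nodup_ofList _))
  have hmain := main_loop_eq (fun q => (PySem.Set.ofList (((uploaded_keys.zip (uploaded_keys.map (fun k => resolveParent md_results k))).filter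
        (fun kq => kq.2 ≠ "" ∧ kq.2 = q)).map (fun kq => kq.1))).len ≥ (PySem.Dict.mk parent_part_totals).getD q 1)
      df C PySem.Set.empty [] hCnd (by simp) (by simp)
  simp only [List.append_nil] at hmain
  rw [hmain]
  set fb : String → Bool := fun p =>
      !df.contains p &&
        decide ((PySem.Set.ofList (((uploaded_keys.zip (uploaded_keys.map (fun k => resolveParent md_results k))).filter
          (fun kq => kq.2 ≠ "" ∧ kq.2 = p)).map (fun kq => kq.1))).len ≥ (PySem.Dict.mk parent_part_totals).getD p 1)
    with hfbdef
  set ff : String → Bool := fun p =>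
      !df.contains p &&
        !decide ((PySem.Set.ofList (((uploaded_keys.zip (uploaded_keys.map (fun k => resolveParent md_results k))).filter
          (fun kq => kq.2 ≠ "" ∧ kq.2 = p)).map (fun kq => kq.1))).len ≥ (PySem.Dict.mk parent_part_totals).getD p 1)
    with hffdef
  have hofl : PySem.Set.ofList (C.filter fb) = C.filter fb :=
    PySem.Set.ofList_eq_self_of_nodup (C.filter fb) (List.Nodup.filter fb hCnd)
  rw [hofl]
  simp only [Prod.mk.injEq]
  refine ⟨rfl, ?_⟩
  rw [PySem.Set.update_eq_append_filter]
  have hofl2 : PySem.Set.ofList (C.filter (fun x => !(PySem.Set.contains (C.filter fb) x)))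
      = C.filter (fun x => !(PySem.Set.contains (C.filter fb) x)) :=
    PySem.Set.ofList_eq_self_of_nodup _ (List.Nodup.filter _ hCnd)
  rw [hofl2, List.filter_filter]
  congr 1
  apply List.filter_congr
  intro a ha
  simp only [PySem.Set.contains_eq_listContains]
  rw [contains_filter_of_mem C a fb ha, hfbdef, hffdef]
  by_cases hm : a ∈ df <;> simp [hm]



-- ===== VERDICT (by name: the statement is the Claim_ definition above) =====
theorem aggregate_parent_upload_outcomes_py_spec : Claim_equal_aggregate_parent_upload_outcomes_py := by
  intro uk fk md tot _
  exact (ports_eq uk fk md tot)
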